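-- pv_equiv track=rewrite | github.com/songzy12/CodeJam | kickstart/2016/Round B/C.watson_and_intervals.small.py | compute_interval_with_segment_coverage
-- ===== SOURCE A (Python) =====
-- from collections import defaultdict
--
-- def compute_interval_with_segment_coverage(points):
--     """ For each interval, compute the segments it covers along with their coverage count. """
--     interval_with_coverage = defaultdict(list)
--
--     last_position = None
--     active_intervals = set()
--     for position, typ, interval_id in points:
--         if last_position is not None and position != last_position and len(
--                 active_intervals) > 0:
--             segment = (last_position, position)
--             for active_interval_id in active_intervals:
--                 interval_with_coverage[active_interval_id].append(
--                     (segment, len(active_intervals)))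
--
--         if typ == 'L':
--             active_intervals.add(interval_id)
--         else:
--             active_intervals.remove(interval_id)
--         last_position = position
--     return interval_with_coverage
-- ===== SOURCE B (Python) =====
-- from collections import defaultdict
--
-- def compute_interval_with_segment_coverage(points):
--     """Two-phase rewrite: first materialize a table of gap records (segment + frozen
--     snapshot of the active set), then build each interval's list key-major by scanning
--     the table, instead of growing the per-interval lists incrementally during the sweep."""
--     # phase 1: gap table
--     records = []
--     active = set()
--     last = None
--     for position, typ, interval_id in points:
--         if last is not None and position != last and active:
--             records.append(((last, position), list(active)))
--         if typ == 'L':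
--             active.add(interval_id)
--         else:
--             active.remove(interval_id)
--         last = position
--     # phase 2: key-major construction
--     order = []
--     seen = set()
--     for _, ids in records:
--         for i in ids:
--             if i not in seen:
--                 seen.add(i)
--                 order.append(i)
--     result = defaultdict(list)
--     for k in order:
--         result[k] = [(seg, len(ids)) for seg, ids in records if k in ids]
--     return result
-- ===== Notes on version B (the rewrite author's own statement) =====
-- stated objective: alternative
-- what changed: Instead of growing per-interval result lists incrementally while sweeping, B first materializes a table of gap records (segment plus a frozen snapshot of the active set) and then builds the result key-major: each interval's complete list is produced in one comprehension over the table; Pre_ excludes inputs where the sweep removes an id that is not active, on which A (and B) raise KeyError.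
import Mathlib
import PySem

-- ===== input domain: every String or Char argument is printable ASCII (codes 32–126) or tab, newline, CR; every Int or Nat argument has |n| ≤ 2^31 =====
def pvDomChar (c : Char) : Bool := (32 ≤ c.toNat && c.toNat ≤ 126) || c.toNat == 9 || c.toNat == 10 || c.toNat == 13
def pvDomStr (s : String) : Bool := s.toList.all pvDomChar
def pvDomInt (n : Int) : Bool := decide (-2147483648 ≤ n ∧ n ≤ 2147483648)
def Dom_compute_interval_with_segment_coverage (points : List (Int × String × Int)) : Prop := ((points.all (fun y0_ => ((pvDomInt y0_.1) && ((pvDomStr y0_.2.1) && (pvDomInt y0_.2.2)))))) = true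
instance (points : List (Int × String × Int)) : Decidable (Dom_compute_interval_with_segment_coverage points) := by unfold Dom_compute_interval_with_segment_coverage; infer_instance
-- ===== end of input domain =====

-- B replaces A's incremental per-interval appends by a two-phase build (materialized gap
-- table, then key-major construction of each interval's list); equivalence of the RETURN
-- value (a dict, rendered as an association list) is what is proved. objective: alternative.

-- ===== PORT A =====
-- the result dict type
abbrev PvDict := PySem.Dict Int (List ((Int × Int) × Int))

-- inner loop of A: for each active id, append (segment, len(active)) to its list
def pvDistrib (seg : Int × Int) (ids : List Int) (d : PvDict) : PvDict :=
  ids.foldl (fun d k => d.insert k (d.getD k [] ++ [(seg, (ids.length : Int))])) d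

-- one iteration of A's sweep; none = KeyError from set.remove
def pvStepA (st : PvDict × Option Int × PySem.Set Int) (p : Int × String × Int) :
    Option (PvDict × Option Int × PySem.Set Int) :=
  let d := match st.2.1 with
    | none => st.1
    | some l => if p.1 ≠ l ∧ st.2.2 ≠ [] then pvDistrib (l, p.1) st.2.2 st.1 else st.1
  if p.2.1 == "L" then some (d, some p.1, PySem.Set.add st.2.2 p.2.2)
  else match PySem.Set.remove? st.2.2 p.2.2 with
    | none => none
    | some a => some (d, some p.1, a)

def compute_interval_with_segment_coverage (points : List (Int × String × Int)) :
    List (Int × List ((Int × Int) × Int)) :=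
  match points.foldl (fun st p => st.bind (fun s => pvStepA s p))
      (some (PySem.Dict.empty, none, PySem.Set.empty)) with
  | some (d, _, _) => d.items
  | none => []   -- Python raises KeyError here; excluded by Pre_

-- ===== PORT B =====
-- a gap record: the segment and the frozen snapshot of the active set
abbrev PvRec := (Int × Int) × List Int

-- phase 1, one iteration: record the gap, then the same add/remove sweep as A
def pvStepB (st : List PvRec × Option Int × PySem.Set Int) (p : Int × String × Int) :
    Option (List PvRec × Option Int × PySem.Set Int) :=
  let recs := match st.2.1 with
    | none => st.1
    | some l => if p.1 ≠ l ∧ st.2.2 ≠ [] then st.1 ++ [((l, p.1), (st.2.2 : List Int))] else st.1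
  if p.2.1 == "L" then some (recs, some p.1, PySem.Set.add st.2.2 p.2.2)
  else match PySem.Set.remove? st.2.2 p.2.2 with
    | none => none
    | some a => some (recs, some p.1, a)

-- '[(seg, len(ids)) for seg, ids in records if k in ids]'
def pvVals (recs : List PvRec) (k : Int) : List ((Int × Int) × Int) :=
  (recs.filter (fun r => r.2.contains k)).map (fun r => (r.1, (r.2.length : Int)))

-- the 'order'/'seen' loop: first-appearance order of ids over the records
def pvOrder (recs : List PvRec) : PySem.Set Int :=
  recs.foldl (fun s r => PySem.Set.update s r.2) PySem.Set.empty

def compute_interval_with_segment_coverage_alt (points : List (Int × String × Int)) :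
    List (Int × List ((Int × Int) × Int)) :=
  match points.foldl (fun st p => st.bind (fun s => pvStepB s p))
      (some ([], none, PySem.Set.empty)) with
  | none => []   -- same KeyError as A; excluded by Pre_
  | some (recs, _, _) =>
    ((pvOrder recs).foldl (fun d k => d.insert k (pvVals recs k)) PySem.Dict.empty).items

-- ===== PRECONDITION & SPEC =====
-- Pre_ excludes exactly the inputs on which A raises KeyError: a non-'L' point whose
-- interval id's most recent earlier event with the same id is absent or not an 'L'.
def Pre_compute_interval_with_segment_coverage (points : List (Int × String × Int)) : Prop :=
  ∀ i, (h : i < points.length) → points[i].2.1 ≠ "L" →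
    (((points.take i).filter (fun q => q.2.2 == points[i].2.2)).getLast?.any
      (fun q => q.2.1 == "L")) = true
instance (points : List (Int × String × Int)) : Decidable (Pre_compute_interval_with_segment_coverage points) := by
  unfold Pre_compute_interval_with_segment_coverage; infer_instance

def pvWitness_compute_interval_with_segment_coverage : (List (Int × String × Int)) :=
  [(0, "L", 1), (2, "R", 1)]

def Spec_compute_interval_with_segment_coverage (points : List (Int × String × Int)) (out : List (Int × List ((Int × Int) × Int))) : Prop := out = compute_interval_with_segment_coverage_alt points
instance (points : List (Int × String × Int)) (out : List (Int × List ((Int × Int) × Int))) : Decidable (Spec_compute_interval_with_segment_coverage points out) := by unfold Spec_compute_interval_with_segment_coverage; infer_instance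

-- ===== CLAIM (what is proved, stated in full; the proofs are below) =====
def Claim_equal_compute_interval_with_segment_coverage : Prop := ∀ (points : List (Int × String × Int)), Dom_compute_interval_with_segment_coverage points → Pre_compute_interval_with_segment_coverage points → Spec_compute_interval_with_segment_coverage points (compute_interval_with_segment_coverage points)

-- ===== LEMMAS AND PROOFS =====

-- A's whole sweep, expressed as B's sweep followed by distributing the recorded gaps
def pvG (recs : List PvRec) (d : PvDict) : PvDict :=
  recs.foldl (fun d r => pvDistrib r.1 r.2 d) d

lemma pvFoldB_none (pts : List (Int × String × Int)) :
    pts.foldl (fun st p => st.bind (fun s => pvStepB s p)) none = none := by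
  induction pts <;> simp [List.foldl, *]
lemma pvFoldA_none (pts : List (Int × String × Int)) :
    pts.foldl (fun st p => st.bind (fun s => pvStepA s p)) none = none := by
  induction pts <;> simp [List.foldl, *]

lemma pvStepB_shift (recs0 recs : List PvRec) (last : Option Int) (active : PySem.Set Int)
    (p : Int × String × Int) :
    pvStepB (recs0 ++ recs, last, active) p
      = Option.map (fun s => (recs0 ++ s.1, s.2.1, s.2.2)) (pvStepB (recs, last, active) p) := by
  unfold pvStepB
  cases last <;> split_ifs <;> (repeat' split) <;> simp_all [List.append_assoc]

lemma pvFoldB_shift (pts : List (Int × String × Int)) :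
    ∀ (recs0 : List PvRec) (last : Option Int) (active : PySem.Set Int),
    pts.foldl (fun st p => st.bind (fun s => pvStepB s p)) (some (recs0, last, active))
      = Option.map (fun s => (recs0 ++ s.1, s.2.1, s.2.2))
          (pts.foldl (fun st p => st.bind (fun s => pvStepB s p)) (some ([], last, active))) := by
  induction pts with
  | nil => intro recs0 last active; simp
  | cons p pts ih =>
    intro recs0 last active
    simp only [List.foldl_cons, Option.bind_some]
    have h0 : pvStepB (recs0, last, active) p
        = Option.map (fun s => (recs0 ++ s.1, s.2.1, s.2.2)) (pvStepB (([] : List PvRec), last, active) p) := by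
      simpa using pvStepB_shift recs0 [] last active p
    rw [h0]
    cases hs : pvStepB (([] : List PvRec), last, active) p with
    | none => simp [pvFoldB_none]
    | some s =>
      simp only [Option.map_some]
      rw [ih (recs0 ++ s.1) s.2.1 s.2.2, ih s.1 s.2.1 s.2.2]
      cases hf : pts.foldl (fun st p => st.bind (fun s => pvStepB s p)) (some ([], s.2.1, s.2.2)) <;>
        simp [List.append_assoc]

lemma pvStepAB (d : PvDict) (last : Option Int) (active : PySem.Set Int) (p : Int × String × Int) :
    pvStepA (d, last, active) p
      = Option.map (fun s => (pvG s.1 d, s.2.1, s.2.2)) (pvStepB (([] : List PvRec), last, active) p) := by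
  unfold pvStepA pvStepB
  cases last <;> split_ifs <;> (repeat' split) <;> simp_all [pvG, pvDistrib]

lemma pvFoldAB (pts : List (Int × String × Int)) :
    ∀ (d : PvDict) (last : Option Int) (active : PySem.Set Int),
    pts.foldl (fun st p => st.bind (fun s => pvStepA s p)) (some (d, last, active))
      = Option.map (fun s => (pvG s.1 d, s.2.1, s.2.2))
          (pts.foldl (fun st p => st.bind (fun s => pvStepB s p)) (some ([], last, active))) := by
  induction pts with
  | nil => intro d last active; simp [pvG]
  | cons p pts ih =>
    intro d last active
    simp only [List.foldl_cons, Option.bind_some]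
    rw [pvStepAB]
    cases hs : pvStepB (([] : List PvRec), last, active) p with
    | none => simp [pvFoldA_none, pvFoldB_none]
    | some s =>
      simp only [Option.map_some]
      rw [ih (pvG s.1 d) s.2.1 s.2.2, pvFoldB_shift pts s.1 s.2.1 s.2.2]
      cases hf : pts.foldl (fun st p => st.bind (fun s => pvStepB s p)) (some ([], s.2.1, s.2.2)) with
      | none => simp
      | some t => simp [pvG, List.foldl_append]

lemma pvKeys_G (recs : List PvRec) : ∀ (d : PvDict),
    (pvG recs d).keys = recs.foldl (fun s r => PySem.Set.update s r.2) d.keys := by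
  induction recs with
  | nil => intro d; simp [pvG]
  | cons r recs ih =>
    intro d
    simp only [pvG, List.foldl_cons] at *
    rw [ih (pvDistrib r.1 r.2 d)]
    congr 1
    exact PySem.Dict.keys_foldl_insert r.2 _ d

lemma pvNodupKeys_G (recs : List PvRec) : ∀ (d : PvDict), d.keys.Nodup → (pvG recs d).keys.Nodup := by
  induction recs with
  | nil => intro d h; simpa [pvG] using h
  | cons r recs ih =>
    intro d h
    simp only [pvG, List.foldl_cons] at *
    exact ih _ (PySem.Dict.nodup_keys_foldl_insert r.2 _ d h)

lemma pvGetD_distrib_aux (l : List Int) : ∀ (d : PvDict) (k : Int) (v : (Int × Int) × Int),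
    l.Nodup →
    (l.foldl (fun d k' => d.insert k' (d.getD k' [] ++ [v])) d).getD k []
      = d.getD k [] ++ (if k ∈ l then [v] else []) := by
  induction l with
  | nil => intro d k v _; simp
  | cons i l ih =>
    intro d k v hnd
    simp only [List.foldl_cons]
    rcases List.nodup_cons.mp hnd with ⟨hi, hl⟩
    by_cases hk : k = i
    · subst hk
      rw [ih _ k v hl]
      simp [PySem.Dict.getD_insert_self, hi]
    · rw [ih _ k v hl, PySem.Dict.getD_insert_of_ne _ _ _ hk]
      simp [List.mem_cons, hk]

lemma pvGetD_G (recs : List PvRec) : ∀ (d : PvDict) (k : Int),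
    (∀ r ∈ recs, (r.2 : List Int).Nodup) →
    (pvG recs d).getD k [] = d.getD k [] ++ pvVals recs k := by
  induction recs with
  | nil => intro d k _; simp [pvG, pvVals]
  | cons r recs ih =>
    intro d k hn
    simp only [pvG, List.foldl_cons] at *
    rw [ih (pvDistrib r.1 r.2 d) k (fun q hq => hn q (List.mem_cons_of_mem r hq))]
    have h1 : (pvDistrib r.1 r.2 d).getD k []
        = d.getD k [] ++ (if k ∈ r.2 then [(r.1, ((r.2 : List Int).length : Int))] else []) :=
      pvGetD_distrib_aux r.2 d k _ (hn r (List.mem_cons_self ..))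
    rw [h1, List.append_assoc]
    congr 1
    by_cases hk : k ∈ (r.2 : List Int) <;> simp [pvVals, hk]

lemma pvNodup_order (recs : List PvRec) : ∀ (s : PySem.Set Int), s.Nodup →
    (recs.foldl (fun s r => PySem.Set.update s r.2) s).Nodup := by
  induction recs with
  | nil => intro s h; simpa using h
  | cons r recs ih =>
    intro s h
    simpa using ih _ (PySem.Set.nodup_update s r.2 h)

lemma pvItems_eq (recs : List PvRec) (hn : ∀ r ∈ recs, (r.2 : List Int).Nodup) :
    (pvG recs PySem.Dict.empty).items
      = ((pvOrder recs).foldl (fun d k => d.insert k (pvVals recs k)) PySem.Dict.empty).items := by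
  have hkeys : (pvG recs PySem.Dict.empty).keys = pvOrder recs := by
    rw [pvKeys_G]; simp [pvOrder, PySem.Dict.keys_empty, PySem.Set.empty]
  have hnk : (pvG recs PySem.Dict.empty).keys.Nodup :=
    pvNodupKeys_G recs _ (by simp [PySem.Dict.keys_empty])
  have hord : (pvOrder recs).Nodup := pvNodup_order recs [] (by simp)
  rw [PySem.Dict.items_eq_map_keys _ hnk [], hkeys]
  rw [PySem.Dict.items_foldl_insert_fresh (pvOrder recs) (fun k => k) (fun k => pvVals recs k)
      PySem.Dict.empty (fun a _ => by simp [PySem.Dict.contains_empty]) (by simpa using hord)]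
  simp only [show (PySem.Dict.empty : PvDict).items = [] from rfl, List.nil_append]
  apply List.map_congr_left
  intro k hk
  rw [pvGetD_G recs _ k hn]
  simp

lemma pvStepB_nodup (recs : List PvRec) (last : Option Int) (active : PySem.Set Int)
    (p : Int × String × Int) (s : List PvRec × Option Int × PySem.Set Int)
    (h1 : ∀ r ∈ recs, (r.2 : List Int).Nodup) (h2 : active.Nodup)
    (hs : pvStepB (recs, last, active) p = some s) :
    (∀ r ∈ s.1, (r.2 : List Int).Nodup) ∧ s.2.2.Nodup := by
  have hr : ∀ r ∈ (match last with
      | none => recs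
      | some l => if p.1 ≠ l ∧ active ≠ [] then recs ++ [((l, p.1), (active : List Int))] else recs),
      (r.2 : List Int).Nodup := by
    cases last <;> simp only [] <;> [exact h1; skip]
    split_ifs <;> [skip; exact h1]
    intro r hrr
    rcases List.mem_append.mp hrr with h | h
    · exact h1 r h
    · simp at h; subst h; exact h2
  unfold pvStepB at hs
  by_cases hL : (p.2.1 == "L") = true
  · simp only [hL, if_true] at hs
    injection hs with h; subst h
    exact ⟨hr, PySem.Set.nodup_add active p.2.2 h2⟩
  · simp only [hL, Bool.false_eq_true, if_false] at hs
    cases ha : PySem.Set.remove? active p.2.2 with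
    | none => rw [ha] at hs; cases hs
    | some a =>
      rw [ha] at hs
      injection hs with h; subst h
      refine ⟨hr, ?_⟩
      rw [PySem.Set.remove?] at ha
      split at ha
      · injection ha with h2'; subst h2'
        exact PySem.Set.nodup_discard active p.2.2 h2
      · cases ha

lemma pvFoldB_nodup (pts : List (Int × String × Int)) :
    ∀ (recs : List PvRec) (last : Option Int) (active : PySem.Set Int)
      (res : List PvRec × Option Int × PySem.Set Int),
    (∀ r ∈ recs, (r.2 : List Int).Nodup) → active.Nodup →
    pts.foldl (fun st p => st.bind (fun s => pvStepB s p)) (some (recs, last, active)) = some res →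
    ∀ r ∈ res.1, (r.2 : List Int).Nodup := by
  induction pts with
  | nil =>
    intro recs last active res h1 _ hres
    cases hres; exact h1
  | cons p pts ih =>
    intro recs last active res h1 h2 hres
    simp only [List.foldl_cons, Option.bind_some] at hres
    cases hs : pvStepB (recs, last, active) p with
    | none =>
      rw [hs] at hres
      rw [pvFoldB_none pts] at hres
      cases hres
    | some s =>
      rw [hs] at hres
      obtain ⟨hA, hB⟩ := pvStepB_nodup recs last active p s h1 h2 hs
      exact ih s.1 s.2.1 s.2.2 res hA hB (by simpa using hres)

-- ===== VERDICT (by name: the statement is the Claim_ definition above) =====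
theorem compute_interval_with_segment_coverage_spec : Claim_equal_compute_interval_with_segment_coverage := by
  intro points _hdom _hpre
  unfold Spec_compute_interval_with_segment_coverage
  unfold compute_interval_with_segment_coverage compute_interval_with_segment_coverage_alt
  rw [pvFoldAB]
  cases hB : points.foldl (fun st p => st.bind (fun s => pvStepB s p))
      (some (([] : List PvRec), (none : Option Int), PySem.Set.empty)) with
  | none => simp
  | some res =>
    have hnd := pvFoldB_nodup points [] none PySem.Set.empty res (by simp) (by simp [PySem.Set.empty]) hB
    simp only [Option.map_some]
    exact pvItems_eq res.1 hnd
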